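-- pv_equiv track=rewrite | github.com/daniel-reich/ubiquitous-fiesta | Mkt3yqQMsw9e3Jmjq_0.py | disjoint_cycle_form
-- ===== SOURCE A (Python) =====
-- def disjoint_cycle_form(perm):
--     map_ = {a: b for a, b in zip(sorted(perm), perm) if a != b}
--     disjoint = set()
--
--     while map_:
--         i = min(map_)
--         group = []
--         while i in map_:
--             j = map_[i]
--             group.append(i)
--             del map_[i]
--             i = j
--         disjoint.add(tuple(group))
--
--     return disjoint
-- ===== SOURCE B (Python) =====
-- def disjoint_cycle_form(perm):
--     map_ = {a: b for a, b in zip(sorted(perm), perm) if a != b}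
--     remaining = set(map_)
--     disjoint = set()
--     for k in sorted(map_):
--         if k in remaining:
--             group = []
--             j = k
--             while j in remaining:
--                 group.append(j)
--                 remaining.remove(j)
--                 j = map_[j]
--             disjoint.add(tuple(group))
--     return disjoint
-- ===== Notes on version B (the rewrite author's own statement) =====
-- stated objective: faster
-- what changed: A repeatedly scans the whole remaining dict for its minimum key and deletes entries as it chases each cycle; B sorts the keys once and makes a single pass over them with a visited set, starting a cycle at each not-yet-visited key.
import Mathlib
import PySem

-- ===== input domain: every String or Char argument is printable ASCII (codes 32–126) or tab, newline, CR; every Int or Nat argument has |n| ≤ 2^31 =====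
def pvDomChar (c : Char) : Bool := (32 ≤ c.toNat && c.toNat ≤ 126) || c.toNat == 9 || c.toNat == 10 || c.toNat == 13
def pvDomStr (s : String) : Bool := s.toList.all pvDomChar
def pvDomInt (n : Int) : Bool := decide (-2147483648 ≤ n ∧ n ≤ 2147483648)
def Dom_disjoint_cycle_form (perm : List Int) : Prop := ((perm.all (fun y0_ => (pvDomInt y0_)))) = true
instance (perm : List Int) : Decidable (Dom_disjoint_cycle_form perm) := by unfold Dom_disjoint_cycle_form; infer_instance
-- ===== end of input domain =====

-- B replaces A's repeated min-of-remaining-dict scan (+ deletion) by one sorted pass over the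
-- keys with a visited set; measured faster at large sizes (return value only, no mutation).

-- ===== PORT A =====
-- map_ = {a: b for a, b in zip(sorted(perm), perm) if a != b}
def pvBuildMapA (perm : List Int) : PySem.Dict Int Int :=
  ((PySem.List.sorted perm (fun x => x)).zip perm).foldl
    (fun d p => if p.1 ≠ p.2 then d.insert p.1 p.2 else d) (PySem.Dict.mk [])

-- inner loop: while i in map_: j = map_[i]; group.append(i); del map_[i]; i = j
-- (contains i → get? i is some, so the getD default 0 is unreachable)
def pvChainA (d : PySem.Dict Int Int) (i : Int) (g : List Int) : List Int × PySem.Dict Int Int :=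
  if h : d.contains i then
    pvChainA (d.erase i) ((d.get? i).getD 0) (g ++ [i])
  else (g, d)
termination_by d.size
decreasing_by
  simp only [PySem.Dict.contains] at h
  simp only [PySem.Dict.erase, PySem.Dict.size]
  rcases List.any_eq_true.mp h with ⟨p, hp, hpk⟩
  exact List.length_filter_lt_length_iff_exists.mpr ⟨p, hp, by simp_all⟩

theorem pvChainA_size_le (d : PySem.Dict Int Int) (i : Int) (g : List Int) :
    (pvChainA d i g).2.size ≤ d.size := by
  fun_induction pvChainA d i g with
  | case1 d i g h ih =>
      refine le_trans ih ?_
      simp only [PySem.Dict.erase, PySem.Dict.size]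
      exact List.length_filter_le _ _
  | case2 => simp

theorem pvChainA_size_lt (d : PySem.Dict Int Int) (i : Int) (g : List Int)
    (h : d.contains i) : (pvChainA d i g).2.size < d.size := by
  rw [pvChainA, dif_pos h]
  refine lt_of_le_of_lt (pvChainA_size_le _ _ _) ?_
  simp only [PySem.Dict.contains] at h
  simp only [PySem.Dict.erase, PySem.Dict.size]
  rcases List.any_eq_true.mp h with ⟨p, hp, hpk⟩
  exact List.length_filter_lt_length_iff_exists.mpr ⟨p, hp, by simp_all⟩

-- outer loop: while map_: i = min(map_); … ; disjoint.add(tuple(group))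
-- (map_ nonempty → min? is some, so the getD default 0 is unreachable)
def pvLoopA (d : PySem.Dict Int Int) (acc : PySem.Set (List Int)) : PySem.Set (List Int) :=
  if hne : d.size = 0 then acc
  else
    let i := (PySem.List.min? d.keys (fun x => x)).getD 0
    let c := pvChainA d i []
    pvLoopA c.2 (PySem.Set.add acc c.1)
termination_by d.size
decreasing_by
  refine pvChainA_size_lt _ _ _ ?_
  have hk : d.keys ≠ [] := by
    simp only [PySem.Dict.keys, PySem.Dict.size] at hne ⊢
    simpa using hne
  rcases hm : PySem.List.min? d.keys (fun x => x) with _ | m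
  · exact absurd ((PySem.List.min?_eq_none_iff _ _).mp hm) hk
  · have := PySem.List.min?_mem hm
    simpa [PySem.Dict.contains_iff_mem_keys] using this

def disjoint_cycle_form (perm : List Int) : List (List Int) :=
  pvLoopA (pvBuildMapA perm) []

-- ===== PORT B =====
-- map_ = {a: b for a, b in zip(sorted(perm), perm) if a != b}   (same comprehension as in A)
def pvBuildMapB (perm : List Int) : PySem.Dict Int Int :=
  ((PySem.List.sorted perm (fun x => x)).zip perm).foldl
    (fun d p => if p.1 ≠ p.2 then d.insert p.1 p.2 else d) (PySem.Dict.mk [])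

-- while j in remaining: group.append(j); remaining.remove(j); j = map_[j]
-- (j ∈ remaining ⊆ map_.keys, so remove = discard and the getD default 0 is unreachable)
def pvChainB (m : PySem.Dict Int Int) (r : PySem.Set Int) (j : Int) (g : List Int) :
    List Int × PySem.Set Int :=
  if h : j ∈ r then
    pvChainB m (PySem.Set.discard r j) (m.getD j 0) (g ++ [j])
  else (g, r)
termination_by r.length
decreasing_by
  simp only [PySem.Set.discard]
  exact List.length_filter_lt_length_iff_exists.mpr ⟨j, h, by simp⟩

-- for k in sorted(map_): if k in remaining: … ; disjoint.add(tuple(group))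
def pvScanB (m : PySem.Dict Int Int) : List Int → PySem.Set Int → PySem.Set (List Int) → PySem.Set (List Int)
  | [], _, acc => acc
  | k :: ks, r, acc =>
    if k ∈ r then
      let c := pvChainB m r k []
      pvScanB m ks c.2 (PySem.Set.add acc c.1)
    else pvScanB m ks r acc

def disjoint_cycle_form_alt (perm : List Int) : List (List Int) :=
  let m := pvBuildMapB perm
  pvScanB m (PySem.List.sorted m.keys (fun x => x)) (PySem.Set.ofList m.keys) []

-- ===== PRECONDITION & SPEC =====
def Spec_disjoint_cycle_form (perm : List Int) (out : List (List Int)) : Prop := out = disjoint_cycle_form_alt perm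
instance (perm : List Int) (out : List (List Int)) : Decidable (Spec_disjoint_cycle_form perm out) := by unfold Spec_disjoint_cycle_form; infer_instance

-- ===== CLAIM (what is proved, stated in full; the proofs are below) =====
def Claim_equal_disjoint_cycle_form : Prop := ∀ (perm : List Int), Dom_disjoint_cycle_form perm → Spec_disjoint_cycle_form perm (disjoint_cycle_form perm)

-- ===== LEMMAS AND PROOFS =====

-- A's dict, restricted to the keys still unvisited on B's side
def pvRestrict (m : PySem.Dict Int Int) (r : List Int) : PySem.Dict Int Int :=
  PySem.Dict.mk (m.items.filter (fun p => decide (p.1 ∈ r)))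

theorem pvRestrict_get? (m : PySem.Dict Int Int) (r : List Int) (i : Int) :
    (pvRestrict m r).get? i = if i ∈ r then m.get? i else none := by
  obtain ⟨l⟩ := m
  simp only [pvRestrict, PySem.Dict.get?]
  induction l with
  | nil => simp
  | cons a t ih =>
      simp only [List.filter_cons]
      by_cases har : a.1 ∈ r
      · rw [if_pos (by simpa using har)]
        by_cases hk : a.1 = i
        · rw [List.find?_cons_of_pos (by simpa using hk),
              List.find?_cons_of_pos (by simpa using hk), if_pos (hk ▸ har)]
        · rw [List.find?_cons_of_neg (by simpa using hk),
              List.find?_cons_of_neg (by simpa using hk), ih]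
      · rw [if_neg (by simpa using har), ih]
        by_cases hir : i ∈ r
        · rw [if_pos hir, if_pos hir,
              List.find?_cons_of_neg (by simp; rintro rfl; exact har hir)]
        · rw [if_neg hir, if_neg hir]

theorem pvRestrict_erase (m : PySem.Dict Int Int) (r : List Int) (i : Int) :
    (pvRestrict m r).erase i = pvRestrict m (PySem.Set.discard r i) := by
  simp only [pvRestrict, PySem.Dict.erase, PySem.Set.discard, List.filter_filter]
  congr 1
  apply List.filter_congr
  intro p _
  by_cases h1 : p.1 = i <;> by_cases h2 : p.1 ∈ r <;>
    simp [h1, h2, List.mem_filter]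

theorem pvRestrict_keys (m : PySem.Dict Int Int) (r : List Int) (x : Int) :
    x ∈ (pvRestrict m r).keys ↔ x ∈ m.keys ∧ x ∈ r := by
  simp only [pvRestrict, PySem.Dict.keys, List.mem_map, List.mem_filter]
  constructor
  · rintro ⟨p, ⟨hp, hr⟩, rfl⟩; exact ⟨⟨p, hp, rfl⟩, by simpa using hr⟩
  · rintro ⟨⟨p, hp, rfl⟩, hr⟩; exact ⟨p, ⟨hp, by simpa using hr⟩, rfl⟩

theorem pvChainB_sub (m : PySem.Dict Int Int) (r : PySem.Set Int) (j : Int) (g : List Int) :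
    ∀ x ∈ (pvChainB m r j g).2, x ∈ r := by
  fun_induction pvChainB m r j g with
  | case1 r j g h ih =>
      intro x hx
      have := ih x hx
      simp only [PySem.Set.discard, List.mem_filter] at this
      exact this.1
  | case2 => intro x hx; exact hx

theorem pvChain_eq (m : PySem.Dict Int Int) (r : PySem.Set Int) (j : Int) (g : List Int)
    (hsub : ∀ x ∈ r, x ∈ m.keys) :
    pvChainA (pvRestrict m r) j g = ((pvChainB m r j g).1, pvRestrict m (pvChainB m r j g).2) := by
  fun_induction pvChainB m r j g with
  | case1 r j g h ih =>
      have hkey : j ∈ m.keys := hsub j h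
      have hget : ∃ v, m.get? j = some v := by
        rcases hv : m.get? j with _ | v
        · exact absurd ((PySem.Dict.get?_eq_none_iff_not_mem_keys _ _).mp hv) (by simp [hkey])
        · exact ⟨v, rfl⟩
      rcases hget with ⟨v, hv⟩
      have hcont : (pvRestrict m r).contains j := by
        rw [PySem.Dict.contains_eq_isSome_get?, pvRestrict_get?]
        simp [h, hv]
      rw [pvChainA, dif_pos hcont]
      have hgd : m.getD j 0 = v := by
        rw [PySem.Dict.getD_eq_get?_getD, hv]; rfl
      have hget' : ((pvRestrict m r).get? j).getD 0 = v := by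
        rw [pvRestrict_get?]; simp [h, hv]
      rw [hget', pvRestrict_erase, ← hgd]
      exact ih (fun x hx => hsub x ((by
        simp only [PySem.Set.discard, List.mem_filter] at hx; exact hx.1) : x ∈ r))
  | case2 r j g h =>
      have hcont : ¬ (pvRestrict m r).contains j := by
        rw [PySem.Dict.contains_eq_isSome_get?, pvRestrict_get?]
        simp [h]
      rw [pvChainA, dif_neg hcont]

theorem pvLoop_eq_scan (m : PySem.Dict Int Int) (ks : List Int) (r : PySem.Set Int)
    (acc : PySem.Set (List Int))
    (hsub : ∀ x ∈ r, x ∈ m.keys) (hks : ∀ x ∈ r, x ∈ ks)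
    (hsort : ks.Pairwise (· ≤ ·)) :
    pvLoopA (pvRestrict m r) acc = pvScanB m ks r acc := by
  induction ks generalizing r acc with
  | nil =>
      have hr : r = [] := List.eq_nil_iff_forall_not_mem.mpr
        (fun x hx => absurd (hks x hx) List.not_mem_nil)
      subst hr
      have h0 : (pvRestrict m []).size = 0 := by
        simp [pvRestrict, PySem.Dict.size]
      rw [pvLoopA, dif_pos h0]
      rfl
  | cons k ks ih =>
      by_cases hkr : k ∈ r
      · -- A starts a cycle at k = min of the remaining keys
        have hkkeys : k ∈ (pvRestrict m r).keys := (pvRestrict_keys m r k).mpr ⟨hsub k hkr, hkr⟩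
        have hne : ¬ (pvRestrict m r).size = 0 := by
          simp only [PySem.Dict.size]
          intro h0
          rw [List.length_eq_zero_iff] at h0
          simp [PySem.Dict.keys, h0] at hkkeys
        have hmin : PySem.List.min? (pvRestrict m r).keys (fun x => x) = some k := by
          rcases hm : PySem.List.min? (pvRestrict m r).keys (fun x => x) with _ | v
          · rw [PySem.List.min?_eq_none_iff] at hm
            simp [hm] at hkkeys
          · have hv1 : v ∈ (pvRestrict m r).keys := PySem.List.min?_mem hm
            have hv2 : v ≤ k := PySem.List.min?_isMin hm k hkkeys
            have hv3 : k ≤ v := by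
              have hvr : v ∈ r := ((pvRestrict_keys m r v).mp hv1).2
              rcases List.mem_cons.mp (hks v hvr) with rfl | h
              · exact le_refl _
              · exact (List.pairwise_cons.mp hsort).1 v h
            rw [le_antisymm hv2 hv3]
        have hsub2 : ∀ x ∈ (PySem.Set.discard r k), x ∈ r := by
          intro x hx
          simp only [PySem.Set.discard, List.mem_filter] at hx
          exact hx.1
        have hstep : ∀ x ∈ (pvChainB m r k []).2, x ∈ PySem.Set.discard r k := by
          rw [pvChainB, dif_pos hkr]
          exact pvChainB_sub m _ _ _
        rw [pvLoopA, dif_neg hne]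
        simp only [hmin, Option.getD_some]
        rw [pvChain_eq m r k [] hsub]
        rw [pvScanB, if_pos hkr]
        exact ih (pvChainB m r k []).2 _
          (fun x hx => hsub x (hsub2 x (hstep x hx)))
          (fun x hx => by
            have hxd := hstep x hx
            simp only [PySem.Set.discard, List.mem_filter] at hxd
            rcases List.mem_cons.mp (hks x hxd.1) with rfl | h
            · simp at hxd
            · exact h)
          (List.pairwise_cons.mp hsort).2
      · rw [pvScanB, if_neg hkr]
        exact ih r acc hsub
          (fun x hx => by
            rcases List.mem_cons.mp (hks x hx) with rfl | h
            · exact absurd hx hkr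
            · exact h)
          (List.pairwise_cons.mp hsort).2

-- ===== VERDICT (by name: the statement is the Claim_ definition above) =====
theorem disjoint_cycle_form_spec : Claim_equal_disjoint_cycle_form := by
  intro perm _
  unfold Spec_disjoint_cycle_form disjoint_cycle_form disjoint_cycle_form_alt
  have hBA : pvBuildMapB perm = pvBuildMapA perm := rfl
  rw [hBA]
  set m := pvBuildMapA perm with hm
  have hfull : pvRestrict m (PySem.Set.ofList m.keys) = m := by
    apply PySem.Dict.ext
    simp only [pvRestrict]
    apply List.filter_eq_self.mpr
    intro p hp
    have : p.1 ∈ m.keys := by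
      simp only [PySem.Dict.keys, List.mem_map]
      exact ⟨p, hp, rfl⟩
    simpa using (PySem.Set.mem_ofList _ _).mpr this
  conv_lhs => rw [← hfull]
  exact pvLoop_eq_scan m (PySem.List.sorted m.keys (fun x => x)) (PySem.Set.ofList m.keys) []
    (fun x hx => (PySem.Set.mem_ofList _ _).mp hx)
    (fun x hx => ((PySem.List.sorted_perm m.keys (fun x => x) false).mem_iff).mpr ((PySem.Set.mem_ofList _ _).mp hx))
    (PySem.List.sorted_pairwise m.keys (fun x => x))
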